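-- pv_equiv track=rewrite | github.com/LucaAgos6/Fantacalcio | fantaculo.py | makePointsLists
-- ===== SOURCE A (Python) =====
-- def punti(punt1, punt2):
--     if punt1 > punt2:
--         return 3
--     if punt1 == punt2:
--         return 1
--     if punt1 < punt2:
--         return 0
--
-- def makePointsLists(listaGol):
--     n = len(listaGol)
--     half = n // 2  # metà lista, es. 10 -> 5
--
--     listaExp = [0] * n
--     listaPoints = [0] * n
--
--     for j in range(n):
--         # punti "attesi" contro tutti gli altri
--         for k in range(n):
--             if j != k:
--                 listaExp[j] += punti(listaGol[j], listaGol[k])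
--
--         # punti effettivi del match
--         if j < half:
--             listaPoints[j] = punti(listaGol[j], listaGol[j + half])
--         else:
--             listaPoints[j] = punti(listaGol[j], listaGol[j - half])
--
--     return listaExp, listaPoints
-- ===== SOURCE B (Python) =====
-- def makePointsLists(listaGol):
--     n = len(listaGol)
--     half = n // 2
--
--     # expected points: 3 * (#strictly smaller) + (#equal - 1), via counts of the
--     # distinct values in ascending order (no pairwise comparisons)
--     cnt = {}
--     for g in listaGol:
--         cnt[g] = cnt.get(g, 0) + 1
--     acc = 0
--     expOf = {}
--     for v in sorted(cnt):
--         expOf[v] = 3 * acc + cnt[v] - 1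
--         acc += cnt[v]
--     listaExp = [expOf[g] for g in listaGol]
--
--     # actual match points against the paired opponent
--     listaPoints = []
--     for j, g in enumerate(listaGol):
--         o = listaGol[j + half] if j < half else listaGol[j - half]
--         listaPoints.append(3 if g > o else 1 if g == o else 0)
--
--     return listaExp, listaPoints
-- ===== Notes on version B (the rewrite author's own statement) =====
-- stated objective: faster
-- what changed: Replaces the all-pairs punti double loop by a one-pass value counter plus a sorted prefix-sum over distinct values (exp[g] = 3*#smaller + #equal - 1), looked up per element.
import Mathlib
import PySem

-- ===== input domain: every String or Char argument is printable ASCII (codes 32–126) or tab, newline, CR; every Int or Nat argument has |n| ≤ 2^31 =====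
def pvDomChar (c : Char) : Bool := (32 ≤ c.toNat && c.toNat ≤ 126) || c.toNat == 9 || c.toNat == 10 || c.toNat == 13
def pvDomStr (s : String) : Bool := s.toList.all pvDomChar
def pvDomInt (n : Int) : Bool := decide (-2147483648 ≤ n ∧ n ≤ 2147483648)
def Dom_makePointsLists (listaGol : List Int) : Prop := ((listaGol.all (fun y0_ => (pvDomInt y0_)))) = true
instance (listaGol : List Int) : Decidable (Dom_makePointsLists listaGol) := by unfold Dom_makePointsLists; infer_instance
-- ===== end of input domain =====

-- B replaces A's all-pairs double loop by a counting pass plus a sorted prefix-sum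
-- over the distinct values (asymptotically faster measured).

-- ===== PORT A =====
def punti (punt1 punt2 : Int) : Int :=
  if punt1 > punt2 then 3
  else if punt1 = punt2 then 1
  else 0

def makePointsLists (listaGol : List Int) : List Int × List Int :=
  let n : Int := listaGol.length
  let half : Int := PySem.Int.floordiv n 2
  let listaExp := (PySem.List.pyRange 0 n 1).map (fun j =>
    (PySem.List.pyRange 0 n 1).foldl (fun acc k =>
      if j ≠ k then acc + punti (PySem.List.pyGetD listaGol j 0) (PySem.List.pyGetD listaGol k 0)
      else acc) 0)
  let listaPoints := (PySem.List.pyRange 0 n 1).map (fun j =>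
    if j < half then punti (PySem.List.pyGetD listaGol j 0) (PySem.List.pyGetD listaGol (j + half) 0)
    else punti (PySem.List.pyGetD listaGol j 0) (PySem.List.pyGetD listaGol (j - half) 0))
  (listaExp, listaPoints)

-- ===== PORT B =====
def makePointsLists_alt (listaGol : List Int) : List Int × List Int :=
  let n : Int := listaGol.length
  let half : Int := PySem.Int.floordiv n 2
  let cnt : PySem.Dict Int Int :=
    listaGol.foldl (fun d g => d.insert g (d.getD g 0 + 1)) PySem.Dict.empty
  let st : Int × PySem.Dict Int Int :=
    (PySem.List.sorted cnt.keys (fun x => x) false).foldl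
      (fun p v => (p.1 + cnt.getD v 0, p.2.insert v (3 * p.1 + cnt.getD v 0 - 1)))
      (0, PySem.Dict.empty)
  let listaExp := listaGol.map (fun g => st.2.getD g 0)
  let listaPoints := (PySem.List.enumerate listaGol 0).foldl
    (fun acc jg =>
      let o := if jg.1 < half then PySem.List.pyGetD listaGol (jg.1 + half) 0
               else PySem.List.pyGetD listaGol (jg.1 - half) 0
      acc ++ [if jg.2 > o then (3 : Int) else if jg.2 = o then 1 else 0])
    []
  (listaExp, listaPoints)

-- ===== PRECONDITION & SPEC =====
def Spec_makePointsLists (listaGol : List Int) (out : List Int × List Int) : Prop := out = makePointsLists_alt listaGol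
instance (listaGol : List Int) (out : List Int × List Int) : Decidable (Spec_makePointsLists listaGol out) := by unfold Spec_makePointsLists; infer_instance

-- ===== CLAIM (what is proved, stated in full; the proofs are below) =====
def Claim_equal_makePointsLists : Prop := ∀ (listaGol : List Int), Dom_makePointsLists listaGol → Spec_makePointsLists listaGol (makePointsLists listaGol)

-- ===== LEMMAS AND PROOFS =====

-- the common closed form both exp computations reduce to
def expVal (L : List Int) (g : Int) : Int :=
  3 * (L.countP (fun x => decide (x < g)) : Int) + (L.count g : Int) - 1

lemma sum_punti (g : Int) (l : List Int) :
    (l.map (punti g)).sum = 3 * (l.countP (fun x => decide (x < g)) : Int) + (l.count g : Int) := by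
  induction l with
  | nil => simp
  | cons x t ih =>
    simp only [List.map_cons, List.sum_cons, List.countP_cons, List.count_cons, ih]
    rcases lt_trichotomy x g with h | h | h <;>
      simp [punti, h] <;> first | (split_ifs <;> omega) | omega

lemma punti_self (g : Int) : punti g g = 1 := by simp [punti]

lemma innerSum (g : Int) (l : List Int) : ∀ (s j acc : Int),
    (PySem.List.enumerate l s).foldl
        (fun acc p => if j ≠ p.1 then acc + punti g p.2 else acc) acc
    = acc + (l.map (punti g)).sum
      - (if s ≤ j ∧ j < s + l.length then punti g (l.getD (j - s).toNat 0) else 0) := by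
  induction l with
  | nil =>
    intro s j acc
    rw [PySem.List.enumerate_nil]
    simp only [List.foldl_nil, List.map_nil, List.sum_nil, List.length_nil]
    rw [if_neg (by push_cast; omega)]
    ring
  | cons x t ih =>
    intro s j acc
    rw [PySem.List.enumerate_cons]
    simp only [List.foldl_cons]
    rw [ih (s+1) j _]
    by_cases hj : j = s
    · subst hj
      rw [if_neg (by simp), if_neg (by omega),
          if_pos ⟨le_refl j, by simp [List.length_cons]⟩]
      have h0 : (j - j).toNat = 0 := by omega
      simp only [List.map_cons, List.sum_cons, h0, List.getD_cons_zero]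
      ring
    · rw [if_pos hj]
      by_cases hc : s + 1 ≤ j ∧ j < s + 1 + (t.length : Int)
      · rw [if_pos hc, if_pos (by push_cast [List.length_cons] at hc ⊢; omega)]
        have hm : (j - s).toNat = (j - (s+1)).toNat + 1 := by omega
        simp only [List.map_cons, List.sum_cons, hm, List.getD_cons_succ]
        ring
      · rw [if_neg hc, if_neg (by push_cast [List.length_cons] at hc ⊢; omega)]
        simp only [List.map_cons, List.sum_cons]
        ring

lemma expA_eq (L : List Int) : (makePointsLists L).1 = L.map (expVal L) := by
  have hen := PySem.List.enumerate_eq_map_pyRange L 0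
  rw [PySem.List.len_eq] at hen
  unfold makePointsLists
  simp only
  have hsnd : (PySem.List.enumerate L).map (fun p => expVal L p.2) = L.map (expVal L) := by
    rw [show (fun p : Int × Int => expVal L p.2) = expVal L ∘ (fun p : Int × Int => p.2) from rfl,
        ← List.map_map, PySem.List.map_snd_enumerate]
  rw [← hsnd, hen, List.map_map]
  apply List.map_congr_left
  intro j hj
  rw [PySem.List.mem_pyRange_one] at hj
  simp only [Function.comp]
  have hfold : List.foldl (fun acc k => if j ≠ k then acc + punti (PySem.List.pyGetD L j 0) (PySem.List.pyGetD L k 0) else acc) 0 (PySem.List.pyRange 0 (L.length : Int))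
      = List.foldl (fun acc p => if j ≠ p.1 then acc + punti (PySem.List.pyGetD L j 0) p.2 else acc) 0 (PySem.List.enumerate L) := by
    rw [hen, List.foldl_map]
  rw [hfold, innerSum, if_pos ⟨hj.1, by omega⟩, sum_punti]
  have hg : L.getD (j - 0).toNat 0 = PySem.List.pyGetD L j 0 := by
    rw [PySem.List.pyGetD_eq_getElem L 0 hj.1 hj.2]
    rw [List.getD_eq_getElem?_getD]
    have hlt : j.toNat < L.length := by omega
    simp [List.getElem?_eq_getElem hlt]
  rw [hg, punti_self, expVal]
  ring

lemma fold_preserve (c : Int → Int) : ∀ (t : List Int) (a : Int) (d : PySem.Dict Int Int) (g : Int), g ∉ t →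
    ((t.foldl (fun p v => (p.1 + c v, p.2.insert v (3 * p.1 + c v - 1))) (a, d)).2).getD g 0
      = d.getD g 0 := by
  intro t
  induction t with
  | nil => intro a d g _; rfl
  | cons v t ih =>
    intro a d g hg
    simp only [List.foldl_cons]
    rw [ih _ _ _ (fun h => hg (List.mem_cons_of_mem v h))]
    exact PySem.Dict.getD_insert_of_ne d _ 0 (fun h => hg (h ▸ List.mem_cons_self))

lemma fold_exp (c : Int → Int) : ∀ (ks : List Int), ks.Pairwise (· < ·) →
    ∀ g ∈ ks, ∀ (a : Int) (d : PySem.Dict Int Int),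
    ((ks.foldl (fun p v => (p.1 + c v, p.2.insert v (3 * p.1 + c v - 1))) (a, d)).2).getD g 0
      = 3 * (a + ((ks.filter (fun u => decide (u < g))).map c).sum) + c g - 1 := by
  intro ks
  induction ks with
  | nil => intro _ g hg; exact absurd hg (List.not_mem_nil)
  | cons v t ih =>
    intro hpw g hg a d
    rw [List.pairwise_cons] at hpw
    simp only [List.foldl_cons]
    rcases List.mem_cons.mp hg with hgv | hgt
    · subst hgv
      have hnt : g ∉ t := fun h => absurd (hpw.1 g h) (lt_irrefl g)
      rw [fold_preserve c t _ _ g hnt, PySem.Dict.getD_insert_self]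
      have hf : (g :: t).filter (fun u => decide (u < g)) = [] := by
        apply List.filter_eq_nil_iff.mpr
        intro u hu
        rcases List.mem_cons.mp hu with h | h
        · subst h; simp
        · have := hpw.1 u h
          simp only [decide_eq_true_eq]
          omega
      rw [hf]
      simp
    · rw [ih hpw.2 g hgt]
      rw [List.filter_cons, if_pos (by simpa using hpw.1 g hgt)]
      simp only [List.map_cons, List.sum_cons]
      ring

lemma sum_ite_zero (a : Int) : ∀ (K : List Int), a ∉ K →
    (K.map (fun u => if u = a then (1:Int) else 0)).sum = 0 := by
  intro K
  induction K with
  | nil => intro _; rfl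
  | cons k t ih =>
    intro ha
    simp only [List.map_cons, List.sum_cons]
    rw [if_neg (fun h => ha (by rw [← h]; exact List.mem_cons_self)), ih (fun h => ha (List.mem_cons_of_mem k h))]
    ring

lemma sum_ite_eq' (p : Int → Bool) (a : Int) : ∀ (K : List Int), K.Nodup → a ∈ K →
    ((K.filter p).map (fun u => if u = a then (1:Int) else 0)).sum = if p a then 1 else 0 := by
  intro K
  induction K with
  | nil => intro _ ha; exact absurd ha (List.not_mem_nil)
  | cons k t ih =>
    intro hnd ha
    rw [List.nodup_cons] at hnd
    rcases List.mem_cons.mp ha with hak | hat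
    · subst hak
      rw [List.filter_cons]
      by_cases hp : p a
      · rw [if_pos (by simp [hp])]
        simp only [List.map_cons, List.sum_cons]
        rw [sum_ite_zero a _ (fun h => hnd.1 (List.mem_of_mem_filter h)), if_pos hp]
        norm_num
      · rw [if_neg (by simp [hp]), sum_ite_zero a _ (fun h => hnd.1 (List.mem_of_mem_filter h)), if_neg hp]
    · have hka : k ≠ a := fun h => hnd.1 (h ▸ hat)
      rw [List.filter_cons]
      by_cases hp : p k
      · rw [if_pos (by simp [hp])]
        simp only [List.map_cons, List.sum_cons, if_neg hka]
        rw [ih hnd.2 hat]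
        ring
      · rw [if_neg (by simp [hp])]
        exact ih hnd.2 hat

lemma sum_count_filter (p : Int → Bool) (K : List Int) (hK : K.Nodup) : ∀ (l : List Int),
    (∀ x ∈ l, x ∈ K) →
    ((K.filter p).map (fun u => (l.count u : Int))).sum = (l.countP p : Int) := by
  intro l
  induction l with
  | nil => intro _; simp
  | cons a t ih =>
    intro hmem
    have h1 : ((K.filter p).map (fun u => ((a :: t).count u : Int))).sum
        = ((K.filter p).map (fun u => (t.count u : Int))).sum
          + ((K.filter p).map (fun u => if u = a then (1:Int) else 0)).sum := by
      rw [← List.sum_map_add]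
      congr 1
      apply List.map_congr_left
      intro u _
      rw [List.count_cons]
      push_cast
      by_cases h : u = a
      · simp [h]
      · simp [h, Ne.symm h]
    rw [h1, ih (fun x hx => hmem x (List.mem_cons_of_mem a hx)),
        sum_ite_eq' p a K hK (hmem a List.mem_cons_self),
        List.countP_cons]
    by_cases hp : p a <;> simp [hp]

lemma expB_eq (L : List Int) : (makePointsLists_alt L).1 = L.map (expVal L) := by
  simp only [makePointsLists_alt]
  rw [PySem.Dict.foldl_insert_getD_add_one_eq_counter L, PySem.Dict.keys_counter]
  apply List.map_congr_left
  intro g hg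
  have hpw := PySem.List.sorted_ofList_pairwise_lt L
  have hgk : g ∈ PySem.List.sorted (PySem.Set.ofList L) (fun x => x) false :=
    (PySem.List.mem_sorted _ _ _ _).mpr ((PySem.Set.mem_ofList L g).mpr hg)
  rw [fold_exp (fun v => (PySem.Dict.counter L).getD v 0) _ hpw g hgk 0 PySem.Dict.empty]
  have hc : ((PySem.List.sorted (PySem.Set.ofList L) (fun x => x) false).filter
        (fun u => decide (u < g))).map (fun v => (PySem.Dict.counter L).getD v 0)
      = ((PySem.List.sorted (PySem.Set.ofList L) (fun x => x) false).filter
        (fun u => decide (u < g))).map (fun v => ((L.count v : Nat) : Int)) :=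
    List.map_congr_left (fun u _ => PySem.Dict.getD_counter L u)
  rw [hc, sum_count_filter (fun u => decide (u < g)) _
        (hpw.imp (fun h => ne_of_lt h)) L
        (fun x hx => (PySem.List.mem_sorted _ _ _ _).mpr ((PySem.Set.mem_ofList L x).mpr hx)),
      PySem.Dict.getD_counter]
  rw [expVal]
  ring

lemma points_eq (L : List Int) : (makePointsLists L).2 = (makePointsLists_alt L).2 := by
  have hen := PySem.List.enumerate_eq_map_pyRange L 0
  rw [PySem.List.len_eq] at hen
  simp only [makePointsLists, makePointsLists_alt]
  rw [PySem.List.foldl_append_singleton_eq_map, List.nil_append, hen, List.map_map]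
  apply List.map_congr_left
  intro j hj
  simp only [Function.comp]
  simp only [punti]
  split_ifs <;> omega

-- ===== VERDICT (by name: the statement is the Claim_ definition above) =====
theorem makePointsLists_spec : Claim_equal_makePointsLists := by
  intro L _
  unfold Spec_makePointsLists
  exact Prod.ext ((expA_eq L).trans (expB_eq L).symm) (points_eq L)
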